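-- pv_equiv track=rewrite | github.com/atakalive/gokrax | engine/reviewer.py | count_reviews
-- ===== SOURCE A (Python) =====
-- def count_reviews(batch: list, key: str) -> tuple:
--     """(最小レビュー数, P0有無, P1有無, P2有無)"""
--     min_n = min((len(i.get(key, {})) for i in batch), default=0)
--     has_p0 = any(
--         r.get("verdict", "").upper() in ("REJECT", "P0")
--         for i in batch for r in i.get(key, {}).values()
--     )
--     has_p1 = any(
--         r.get("verdict", "").upper() == "P1"
--         for i in batch for r in i.get(key, {}).values()
--     )
--     has_p2 = any(
--         r.get("verdict", "").upper() == "P2"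
--         for i in batch for r in i.get(key, {}).values()
--     )
--     return min_n, has_p0, has_p1, has_p2
-- ===== SOURCE B (Python) =====
-- def count_reviews(batch: list, key: str) -> tuple:
--     """(最小レビュー数, P0有無, P1有無, P2有無) — sort the sizes, index the verdicts in a set."""
--     sizes = sorted(len(i.get(key, {})) for i in batch)
--     min_n = sizes[0] if sizes else 0
--     verdicts = {r.get("verdict", "").upper() for i in batch for r in i.get(key, {}).values()}
--     has_p0 = not verdicts.isdisjoint(("REJECT", "P0"))
--     return (min_n, has_p0, "P1" in verdicts, "P2" in verdicts)
-- ===== Notes on version B (the rewrite author's own statement) =====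
-- stated objective: alternative
-- what changed: Replaced A's min-scan plus three any() scans over the nested review dicts by sort-then-take-first for the minimum and a verdict set built once, with the three flags reduced to set membership / disjointness tests.
import Mathlib
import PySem

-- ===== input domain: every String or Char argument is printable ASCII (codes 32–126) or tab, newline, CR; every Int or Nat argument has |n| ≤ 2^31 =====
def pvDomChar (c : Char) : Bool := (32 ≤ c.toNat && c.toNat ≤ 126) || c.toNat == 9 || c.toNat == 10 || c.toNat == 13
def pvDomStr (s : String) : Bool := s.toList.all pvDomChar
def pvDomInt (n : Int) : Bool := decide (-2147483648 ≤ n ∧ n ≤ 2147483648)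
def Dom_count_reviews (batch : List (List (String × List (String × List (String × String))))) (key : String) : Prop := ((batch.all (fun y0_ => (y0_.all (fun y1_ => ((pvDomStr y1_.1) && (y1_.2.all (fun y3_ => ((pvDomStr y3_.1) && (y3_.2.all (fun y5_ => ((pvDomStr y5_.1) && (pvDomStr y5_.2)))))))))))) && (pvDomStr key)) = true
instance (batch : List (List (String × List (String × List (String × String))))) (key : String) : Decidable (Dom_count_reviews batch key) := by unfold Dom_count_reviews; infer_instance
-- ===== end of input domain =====

-- B sorts the item sizes and takes the first element for the minimum, and builds the set of distinct
-- uppercased verdicts once, answering the three flags by membership/disjointness; objective: alternative.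

-- ===== PORT A =====
-- shared accessors: i.get(key, {}) (as a dict) and r.get("verdict", "").upper()
def pvGetKey (key : String) (i : List (String × List (String × List (String × String)))) :
    PySem.Dict String (List (String × String)) :=
  PySem.Dict.ofList ((PySem.Dict.ofList i).getD key [])

def pvVerdict (r : List (String × String)) : String :=
  PySem.Str.upper ((PySem.Dict.ofList r).getD "verdict" "")

def count_reviews (batch : List (List (String × List (String × List (String × String))))) (key : String) : Int × Bool × Bool × Bool :=
  let min_n : Int :=
    (PySem.List.min? (batch.map (fun i => ((pvGetKey key i).size : Int))) (fun x => x)).getD 0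
  let has_p0 := batch.any (fun i => (pvGetKey key i).values.any
      (fun r => pvVerdict r == "REJECT" || pvVerdict r == "P0"))
  let has_p1 := batch.any (fun i => (pvGetKey key i).values.any (fun r => pvVerdict r == "P1"))
  let has_p2 := batch.any (fun i => (pvGetKey key i).values.any (fun r => pvVerdict r == "P2"))
  (min_n, has_p0, has_p1, has_p2)

-- ===== PORT B =====
def count_reviews_alt (batch : List (List (String × List (String × List (String × String))))) (key : String) : Int × Bool × Bool × Bool :=
  let sizes := PySem.List.sorted (batch.map (fun i => ((pvGetKey key i).size : Int))) (fun x => x) false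
  let min_n : Int := match sizes with | [] => 0 | m :: _ => m
  let verdicts : PySem.Set String :=
    PySem.Set.ofList (batch.flatMap (fun i => (pvGetKey key i).values.map pvVerdict))
  let has_p0 := !(PySem.Set.isdisjoint verdicts ["REJECT", "P0"])
  (min_n, has_p0, PySem.Set.contains verdicts "P1", PySem.Set.contains verdicts "P2")

-- ===== PRECONDITION & SPEC =====
def Spec_count_reviews (batch : List (List (String × List (String × List (String × String))))) (key : String) (out : Int × Bool × Bool × Bool) : Prop := out = count_reviews_alt batch key
instance (batch : List (List (String × List (String × List (String × String))))) (key : String) (out : Int × Bool × Bool × Bool) : Decidable (Spec_count_reviews batch key out) := by unfold Spec_count_reviews; infer_instance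

-- ===== CLAIM (what is proved, stated in full; the proofs are below) =====
def Claim_equal_count_reviews : Prop := ∀ (batch : List (List (String × List (String × List (String × String))))) (key : String), Dom_count_reviews batch key → Spec_count_reviews batch key (count_reviews batch key)

-- ===== LEMMAS AND PROOFS =====

-- min(L) (first extremal, default 0) equals the head of sorted(L) (or 0 when empty)
theorem pvMin_eq_sorted_head (L : List Int) :
    (PySem.List.min? L (fun x => x)).getD 0 =
      (match PySem.List.sorted L (fun x => x) false with | [] => 0 | m :: _ => m) := by
  cases hL : L with
  | nil => rfl
  | cons x t =>
    cases hs : PySem.List.sorted (x :: t) (fun y => y) false with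
    | nil => exact absurd hs (by simp [PySem.List.sorted_eq_nil_iff])
    | cons m t' =>
      rw [PySem.List.min?_id_cons]
      simp only [Option.getD_some]
      have hmem : m ∈ x :: t := by
        have := (PySem.List.sorted_perm (x :: t) (fun y => y) false).mem_iff (a := m)
        rw [hs] at this; exact this.mp (by simp)
      have hle : ∀ y ∈ x :: t, m ≤ y := PySem.List.key_head_sorted_le _ _ hs
      have hfold := PySem.List.foldl_min_le t x
      have hf_le_m : t.foldl min x ≤ m := by
        rcases List.mem_cons.mp hmem with h | h
        · exact h ▸ hfold.1
        · exact hfold.2 m h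
      have hm_le_f : m ≤ t.foldl min x := by
        rcases PySem.List.foldl_min_mem t x with h | h
        · rw [h]; exact hle x (by simp)
        · exact hle _ (List.mem_cons_of_mem _ h)
      omega

-- a flag 'any q over the nested values' equals 'any q over the flattened verdict list'
theorem pvAny_flat (batch : List (List (String × List (String × List (String × String))))) (key : String)
    (q : String → Bool) :
    batch.any (fun i => (pvGetKey key i).values.any (fun r => q (pvVerdict r))) =
      (batch.flatMap (fun i => (pvGetKey key i).values.map pvVerdict)).any q := by
  simp [List.any_flatMap, List.any_map, Function.comp_def]

-- '"v" in set(L)' is 'any (== v) L'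
theorem pvContains_ofList (L : List String) (v : String) :
    PySem.Set.contains (PySem.Set.ofList L) v = L.any (fun w => w == v) := by
  by_cases h : v ∈ L
  · rw [(PySem.Set.contains_iff _ _).mpr ((PySem.Set.mem_ofList _ _).mpr h),
        List.any_eq_true.mpr ⟨v, h, by simp⟩]
  · have h1 : PySem.Set.contains (PySem.Set.ofList L) v = false :=
      Bool.eq_false_iff.mpr (fun hc =>
        h ((PySem.Set.mem_ofList _ _).mp ((PySem.Set.contains_iff _ _).mp hc)))
    have h2 : L.any (fun w => w == v) = false := by
      simp only [List.any_eq_false, beq_iff_eq]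
      rintro w hw rfl; exact h hw
    rw [h1, h2]

-- 'not set(L).isdisjoint(("REJECT","P0"))' is 'any (== "REJECT" or == "P0") L'
theorem pvHasP0 (L : List String) :
    (!(PySem.Set.isdisjoint (PySem.Set.ofList L) ["REJECT", "P0"])) =
      L.any (fun v => v == "REJECT" || v == "P0") := by
  by_cases h : ∃ v ∈ L, v = "REJECT" ∨ v = "P0"
  · rcases h with ⟨v, hv, hor⟩
    have hd : PySem.Set.isdisjoint (PySem.Set.ofList L) ["REJECT", "P0"] = false :=
      Bool.eq_false_iff.mpr (fun hd =>
        (PySem.Set.isdisjoint_iff _ _).mp hd v ((PySem.Set.mem_ofList _ _).mpr hv)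
          (by rcases hor with rfl | rfl <;> simp))
    rw [hd, List.any_eq_true.mpr ⟨v, hv, by rcases hor with rfl | rfl <;> simp⟩]
    rfl
  · push Not at h
    have hd : PySem.Set.isdisjoint (PySem.Set.ofList L) ["REJECT", "P0"] = true :=
      (PySem.Set.isdisjoint_iff _ _).mpr (fun x hx hxt => by
        rcases List.mem_cons.mp hxt with rfl | hxt'
        · exact (h _ ((PySem.Set.mem_ofList _ _).mp hx)).1 rfl
        · rcases List.mem_singleton.mp hxt' with rfl
          exact (h _ ((PySem.Set.mem_ofList _ _).mp hx)).2 rfl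
      )
    have h2 : L.any (fun v => v == "REJECT" || v == "P0") = false := by
      rw [List.any_eq_false]
      intro w hw
      simp only [Bool.or_eq_true, beq_iff_eq, not_or]
      exact h w hw
    rw [hd, h2]
    rfl

theorem count_reviews_eq (batch : List (List (String × List (String × List (String × String))))) (key : String) :
    count_reviews batch key = count_reviews_alt batch key := by
  unfold count_reviews count_reviews_alt
  dsimp only
  simp only [Prod.mk.injEq]
  refine ⟨pvMin_eq_sorted_head _, ?_, ?_, ?_⟩
  · rw [pvHasP0, pvAny_flat batch key (fun v => v == "REJECT" || v == "P0")]
  · rw [pvContains_ofList, pvAny_flat batch key (fun v => v == "P1")]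
  · rw [pvContains_ofList, pvAny_flat batch key (fun v => v == "P2")]

-- ===== VERDICT (by name: the statement is the Claim_ definition above) =====
theorem count_reviews_spec : Claim_equal_count_reviews := by
  intro batch key _
  unfold Spec_count_reviews
  exact count_reviews_eq batch key
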